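-- pv_equiv track=rewrite | github.com/richfrem/Project_Sanctuary | mcp_servers/agent_persona/operations.py | _classify_response
-- ===== SOURCE A (Python) =====
-- def _classify_response(response: str, role: str) -> str:
--     """Classify response type based on keywords."""
--     response_lower = response.lower()
--
--     if role == "coordinator":
--         if any(word in response_lower for word in ["plan", "strategy", "coordinate"]):
--             return "strategy"
--         elif any(word in response_lower for word in ["analysis", "evaluate"]):
--             return "analysis"
--     elif role == "strategist":
--         if any(word in response_lower for word in ["propose", "suggest", "recommend"]):
--             return "proposal"
--         elif any(word in response_lower for word in ["design", "architecture"]):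
--             return "design"
--     elif role == "auditor":
--         if any(word in response_lower for word in ["review", "audit", "validate"]):
--             return "critique"
--         elif any(word in response_lower for word in ["risk", "concern", "issue"]):
--             return "analysis"
--
--     return "discussion"
-- ===== SOURCE B (Python) =====
-- # Flat keyword table + collect-all-matches-then-min selection (no early-return cascade).
-- _KEYWORDS = [
--     ("coordinator", "plan", "strategy"),
--     ("coordinator", "strategy", "strategy"),
--     ("coordinator", "coordinate", "strategy"),
--     ("coordinator", "analysis", "analysis"),
--     ("coordinator", "evaluate", "analysis"),
--     ("strategist", "propose", "proposal"),
--     ("strategist", "suggest", "proposal"),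
--     ("strategist", "recommend", "proposal"),
--     ("strategist", "design", "design"),
--     ("strategist", "architecture", "design"),
--     ("auditor", "review", "critique"),
--     ("auditor", "audit", "critique"),
--     ("auditor", "validate", "critique"),
--     ("auditor", "risk", "analysis"),
--     ("auditor", "concern", "analysis"),
--     ("auditor", "issue", "analysis"),
-- ]
--
--
-- def _classify_response(response: str, role: str) -> str:
--     """Classify response type: gather every matching (priority, label) hit, pick the best."""
--     response_lower = response.lower()
--     hits = [(i, label) for i, (r, kw, label) in enumerate(_KEYWORDS)
--             if r == role and kw in response_lower]
--     if not hits: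
--         return "discussion"
--     return min(hits)[1]
-- ===== Notes on version B (the rewrite author's own statement) =====
-- stated objective: alternative
-- what changed: Replaces the nested if/elif early-return cascade over per-role keyword groups with a flat prioritised (role, keyword, label) table: B collects ALL matching hits as (priority, label) pairs in one comprehension and then selects the minimum-priority hit, instead of returning at the first matching group.
import Mathlib
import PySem

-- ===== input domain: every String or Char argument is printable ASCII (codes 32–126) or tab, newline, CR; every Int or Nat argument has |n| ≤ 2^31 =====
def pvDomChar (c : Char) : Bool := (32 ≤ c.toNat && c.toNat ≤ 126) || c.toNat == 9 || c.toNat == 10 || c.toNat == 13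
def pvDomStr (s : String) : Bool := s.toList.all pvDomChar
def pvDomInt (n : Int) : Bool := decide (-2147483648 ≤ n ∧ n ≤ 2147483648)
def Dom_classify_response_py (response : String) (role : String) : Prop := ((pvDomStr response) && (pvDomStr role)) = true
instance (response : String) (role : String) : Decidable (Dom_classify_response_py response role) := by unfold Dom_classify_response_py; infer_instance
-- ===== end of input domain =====

-- B replaces A's nested if/elif early-return cascade by a flat prioritised keyword table:
-- collect all matching (priority, label) hits, then select the minimum-priority one.
-- Return-value equivalence is proved on the whole domain.

-- ===== PORT A =====
def classify_response_py (response : String) (role : String) : String :=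
  let response_lower := PySem.Str.lower response
  if role == "coordinator" then
    if ["plan", "strategy", "coordinate"].any (fun w => PySem.Str.isIn w response_lower) then "strategy"
    else if ["analysis", "evaluate"].any (fun w => PySem.Str.isIn w response_lower) then "analysis"
    else "discussion"
  else if role == "strategist" then
    if ["propose", "suggest", "recommend"].any (fun w => PySem.Str.isIn w response_lower) then "proposal"
    else if ["design", "architecture"].any (fun w => PySem.Str.isIn w response_lower) then "design"
    else "discussion"
  else if role == "auditor" then
    if ["review", "audit", "validate"].any (fun w => PySem.Str.isIn w response_lower) then "critique"
    else if ["risk", "concern", "issue"].any (fun w => PySem.Str.isIn w response_lower) then "analysis"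
    else "discussion"
  else "discussion"

-- ===== PORT B =====
-- the module-level _KEYWORDS table of Source B
def pvKeywords : List (String × String × String) :=
  [("coordinator", "plan", "strategy"),
   ("coordinator", "strategy", "strategy"),
   ("coordinator", "coordinate", "strategy"),
   ("coordinator", "analysis", "analysis"),
   ("coordinator", "evaluate", "analysis"),
   ("strategist", "propose", "proposal"),
   ("strategist", "suggest", "proposal"),
   ("strategist", "recommend", "proposal"),
   ("strategist", "design", "design"),
   ("strategist", "architecture", "design"),
   ("auditor", "review", "critique"),
   ("auditor", "audit", "critique"),
   ("auditor", "validate", "critique"),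
   ("auditor", "risk", "analysis"),
   ("auditor", "concern", "analysis"),
   ("auditor", "issue", "analysis")]

-- Python's min over the nonempty hits list. The hits are (index, label) tuples with
-- pairwise-distinct indices (enumerate), so Python's lexicographic tuple min is exactly
-- the element with the least first component; the fold below is that running min.
def pvMinHit (x : Int × String) (xs : List (Int × String)) : Int × String :=
  xs.foldl (fun m y => if y.1 < m.1 then y else m) x

def classify_response_py_alt (response : String) (role : String) : String :=
  let response_lower := PySem.Str.lower response
  let hits := ((PySem.List.enumerate pvKeywords).filter
      (fun p => p.2.1 == role && PySem.Str.isIn p.2.2.1 response_lower)).map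
      (fun p => (p.1, p.2.2.2))
  match hits with
  | [] => "discussion"
  | h :: t => (pvMinHit h t).2

-- ===== PRECONDITION & SPEC =====
def Spec_classify_response_py (response : String) (role : String) (out : String) : Prop := out = classify_response_py_alt response role
instance (response : String) (role : String) (out : String) : Decidable (Spec_classify_response_py response role out) := by unfold Spec_classify_response_py; infer_instance

-- ===== CLAIM =====
def Claim_equal_classify_response_py : Prop := ∀ (response : String) (role : String), Dom_classify_response_py response role → Spec_classify_response_py response role (classify_response_py response role)

-- ===== LEMMAS AND PROOFS =====

-- ===== VERDICT =====
theorem classify_response_py_spec : Claim_equal_classify_response_py := by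
  intro response role _
  unfold Spec_classify_response_py classify_response_py classify_response_py_alt
  set rl := PySem.Str.lower response with hrl
  by_cases h1 : role = "coordinator"
  · subst h1
    cases hb1 : PySem.Chars.isIn ['p', 'l', 'a', 'n'] rl.toList <;>
    cases hb2 : PySem.Chars.isIn ['s', 't', 'r', 'a', 't', 'e', 'g', 'y'] rl.toList <;>
    cases hb3 : PySem.Chars.isIn ['c', 'o', 'o', 'r', 'd', 'i', 'n', 'a', 't', 'e'] rl.toList <;>
    cases hb4 : PySem.Chars.isIn ['a', 'n', 'a', 'l', 'y', 's', 'i', 's'] rl.toList <;>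
    cases hb5 : PySem.Chars.isIn ['e', 'v', 'a', 'l', 'u', 'a', 't', 'e'] rl.toList <;>
      simp [pvKeywords, PySem.List.enumerate, pvMinHit, hb1, hb2, hb3, hb4, hb5]
  by_cases h2 : role = "strategist"
  · subst h2
    cases hb1 : PySem.Chars.isIn ['p', 'r', 'o', 'p', 'o', 's', 'e'] rl.toList <;>
    cases hb2 : PySem.Chars.isIn ['s', 'u', 'g', 'g', 'e', 's', 't'] rl.toList <;>
    cases hb3 : PySem.Chars.isIn ['r', 'e', 'c', 'o', 'm', 'm', 'e', 'n', 'd'] rl.toList <;>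
    cases hb4 : PySem.Chars.isIn ['d', 'e', 's', 'i', 'g', 'n'] rl.toList <;>
    cases hb5 : PySem.Chars.isIn ['a', 'r', 'c', 'h', 'i', 't', 'e', 'c', 't', 'u', 'r', 'e'] rl.toList <;>
      simp [pvKeywords, PySem.List.enumerate, pvMinHit, hb1, hb2, hb3, hb4, hb5]
  by_cases h3 : role = "auditor"
  · subst h3
    cases hb1 : PySem.Chars.isIn ['r', 'e', 'v', 'i', 'e', 'w'] rl.toList <;>
    cases hb2 : PySem.Chars.isIn ['a', 'u', 'd', 'i', 't'] rl.toList <;>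
    cases hb3 : PySem.Chars.isIn ['v', 'a', 'l', 'i', 'd', 'a', 't', 'e'] rl.toList <;>
    cases hb4 : PySem.Chars.isIn ['r', 'i', 's', 'k'] rl.toList <;>
    cases hb5 : PySem.Chars.isIn ['c', 'o', 'n', 'c', 'e', 'r', 'n'] rl.toList <;>
    cases hb6 : PySem.Chars.isIn ['i', 's', 's', 'u', 'e'] rl.toList <;>
      simp [pvKeywords, PySem.List.enumerate, pvMinHit, hb1, hb2, hb3, hb4, hb5, hb6]
  have c1 : ("coordinator" == role) = false := beq_eq_false_iff_ne.mpr (fun h => h1 h.symm)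
  have c2 : ("strategist" == role) = false := beq_eq_false_iff_ne.mpr (fun h => h2 h.symm)
  have c3 : ("auditor" == role) = false := beq_eq_false_iff_ne.mpr (fun h => h3 h.symm)
  simp [pvKeywords, PySem.List.enumerate, h1, h2, h3, c1, c2, c3]
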